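-- pv_equiv track=rewrite | github.com/mayur75584/GeeksForGeeks | Infosys Sample Practice/6.py | suff
-- ===== SOURCE A (Python) =====
-- def suff(n,s,query,q):
--     sum1=0
--     for i in query:
--         if i in s:
--             z=s.index(i)
--             if z==-1:
--                 sum1+=0
--             else:
--                 sum1+=len(s[z:])
--     return (sum1%((10**9)+7))
-- ===== SOURCE B (Python) =====
-- def suff(n, s, query, q):
--     # Sweep over s: at each position add the number of query occurrences whose
--     # character has already made its first appearance (sum exchange vs A).
--     cnt = {}
--     for c in query:
--         cnt[c] = cnt.get(c, 0) + 1
--     total = 0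
--     active = 0
--     seen = set()
--     for ch in s:
--         if ch not in seen:
--             seen.add(ch)
--             active += cnt.get(ch, 0)
--         total += active
--     return total % (10**9 + 7)
-- ===== Notes on version B (the rewrite author's own statement) =====
-- stated objective: faster
-- what changed: A scans s (s.index) once per query character and sums suffix lengths; B never computes an index or suffix length: it counts query occurrences once, then sweeps s left-to-right keeping a running 'active' total of query multiplicities of characters already seen, adding 'active' at every position (the double sum exchanged).
import Mathlib
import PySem

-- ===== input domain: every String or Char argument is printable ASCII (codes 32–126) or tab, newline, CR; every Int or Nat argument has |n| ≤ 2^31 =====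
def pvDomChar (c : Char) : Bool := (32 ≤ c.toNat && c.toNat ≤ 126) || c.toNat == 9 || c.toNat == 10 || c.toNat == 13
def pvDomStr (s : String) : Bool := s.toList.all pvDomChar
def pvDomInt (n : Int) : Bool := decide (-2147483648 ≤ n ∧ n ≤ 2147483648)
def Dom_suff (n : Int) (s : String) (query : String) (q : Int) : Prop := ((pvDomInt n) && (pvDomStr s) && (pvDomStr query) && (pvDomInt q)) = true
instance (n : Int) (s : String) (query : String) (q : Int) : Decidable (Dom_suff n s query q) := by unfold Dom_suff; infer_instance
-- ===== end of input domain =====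

-- B replaces A's per-query-character substring scan (s.index per query char, summing suffix lengths)
-- by a single sweep over s with a running count of query-character multiplicities already first-seen,
-- adding that count at every position (the double sum exchanged); objective: faster, O(len(s)+len(query))
-- vs A's O(len(s)*len(query)). Both programs are total.

-- ===== PORT A =====
def suff (n : Int) (s : String) (query : String) (q : Int) : Int :=
  let sum1 : Int := query.toList.foldl (fun sum1 i =>
    if PySem.Chars.isIn [i] s.toList then
      -- s.index(i): guarded by 'i in s', so it never raises and equals s.find(i) (exact here)
      let z : Int := PySem.Chars.find s.toList [i]
      if z = -1 then sum1 + 0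
      else sum1 + ((PySem.List.slice s.toList (some z) none).length : Int)
    else sum1) 0
  PySem.Int.mod sum1 (10 ^ 9 + 7)

-- ===== PORT B =====
def suff_alt (n : Int) (s : String) (query : String) (q : Int) : Int :=
  let cnt := query.toList.foldl (fun d c => d.insert c (d.getD c 0 + 1)) PySem.Dict.empty
  let st : Int × Int × PySem.Set Char := s.toList.foldl
    (fun st ch =>
      if PySem.Set.contains st.2.2 ch then (st.1 + st.2.1, st.2.1, st.2.2)
      else (st.1 + (st.2.1 + cnt.getD ch 0), st.2.1 + cnt.getD ch 0, PySem.Set.add st.2.2 ch))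
    (0, 0, PySem.Set.empty)
  PySem.Int.mod st.1 (10 ^ 9 + 7)

-- ===== PRECONDITION & SPEC =====
def Spec_suff (n : Int) (s : String) (query : String) (q : Int) (out : Int) : Prop := out = suff_alt n s query q
instance (n : Int) (s : String) (query : String) (q : Int) (out : Int) : Decidable (Spec_suff n s query q out) := by unfold Spec_suff; infer_instance

-- ===== CLAIM (what is proved, stated in full; the proofs are below) =====
def Claim_equal_suff : Prop := ∀ (n : Int) (s : String) (query : String) (q : Int), Dom_suff n s query q → Spec_suff n s query q (suff n s query q)

-- ===== LEMMAS AND PROOFS =====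

-- the common per-character value: suffix length from the first occurrence of c in cs, 0 if absent
def suffLen (cs : List Char) (c : Char) : Int :=
  if c ∈ cs then (cs.length : Int) - (cs.idxOf c : Int) else 0

-- a singleton pattern is a prefix of l iff l starts with c
theorem singleton_prefix_iff (c : Char) (l : List Char) : [c] <+: l ↔ l[0]? = some c := by
  cases l with
  | nil => simp
  | cons x xs => simp [List.cons_prefix_cons, eq_comm]

theorem singleton_prefix_drop_iff (cs : List Char) (c : Char) (j : Nat) :
    [c] <+: cs.drop j ↔ cs[j]? = some c := by
  rw [singleton_prefix_iff]
  simp [List.getElem?_drop]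

-- first occurrence is minimal: any position holding c is at or after idxOf
theorem idxOf_le_of_getElem? (cs : List Char) (c : Char) :
    ∀ (k : Nat), cs[k]? = some c → cs.idxOf c ≤ k := by
  induction cs with
  | nil => intro k hk; simp at hk
  | cons x xs ih =>
    intro k hv
    by_cases hx : x = c
    · subst hx; simp
    · cases k with
      | zero => exact absurd (by simpa using hv) hx
      | succ k =>
        have hstep : (x :: xs).idxOf c = xs.idxOf c + 1 := by
          simp [hx]
        rw [hstep]
        have := ih k (by simpa using hv)
        omega

-- s.find(c) for a present single character c is the index of c's first occurrence
theorem find_singleton_of_mem (cs : List Char) (c : Char) (hc : c ∈ cs) :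
    PySem.Chars.find cs [c] = (cs.idxOf c : Int) := by
  have hinf : [c] <:+: cs := (List.singleton_infix_iff c cs).mpr hc
  have hne : PySem.Chars.find cs [c] ≠ -1 := (PySem.Chars.find_ne_neg_one_iff cs [c]).mpr hinf
  have hspec := PySem.Chars.findFrom_natCast_spec cs [c] 0 (Nat.zero_le _)
  rw [show ((0 : Nat) : Int) = 0 from rfl, PySem.Chars.findFrom_zero] at hspec
  obtain ⟨hge, hpre, hmin⟩ := hspec hne
  have hnn : 0 ≤ PySem.Chars.find cs [c] := by simpa using hge
  set z := (PySem.Chars.find cs [c]).toNat with hz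
  have hzc : cs[z]? = some c := (singleton_prefix_drop_iff cs c z).mp hpre
  have hidx : cs.idxOf c < cs.length := List.idxOf_lt_length_of_mem hc
  have h1 : ¬ cs.idxOf c < z := by
    intro hlt
    exact hmin (cs.idxOf c) (Nat.zero_le _) hlt
      ((singleton_prefix_drop_iff cs c _).mpr
        (List.getElem?_eq_some_iff.mpr ⟨hidx, List.getElem_idxOf hidx⟩))
  have h2 : cs.idxOf c ≤ z := idxOf_le_of_getElem? cs c z hzc
  omega

-- value of `i in s ... len(s[z:])` for one query character
theorem stepA_eq (cs : List Char) (sum1 : Int) (i : Char) :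
    (if PySem.Chars.isIn [i] cs then
      if PySem.Chars.find cs [i] = -1 then sum1 + 0
      else sum1 + ((PySem.List.slice cs (some (PySem.Chars.find cs [i])) none).length : Int)
    else sum1) = sum1 + suffLen cs i := by
  by_cases hm : i ∈ cs
  · have hiIn : PySem.Chars.isIn [i] cs = true :=
      (PySem.Chars.isIn_iff_infix [i] cs).mpr ((List.singleton_infix_iff i cs).mpr hm)
    have hf := find_singleton_of_mem cs i hm
    have hidx : cs.idxOf i < cs.length := List.idxOf_lt_length_of_mem hm
    rw [hiIn, if_pos rfl, hf]
    rw [if_neg (by omega : ((cs.idxOf i : Nat) : Int) ≠ -1)]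
    rw [PySem.List.slice_from_natCast]
    simp only [List.length_drop, suffLen, if_pos hm]
    omega
  · have hiIn : PySem.Chars.isIn [i] cs = false :=
      (PySem.Chars.isIn_eq_false_iff [i] cs).mpr (fun h => hm ((List.singleton_infix_iff i cs).mp h))
    simp [hiIn, suffLen, hm]

-- the value B's sweep accumulates over the rest of the scan, as a structural recursion
def gsum (cnt : Char → Int) : List Char → PySem.Set Char → Int
  | [], _ => 0
  | x :: xs, S =>
    if PySem.Set.contains S x then gsum cnt xs S
    else cnt x * ((xs.length : Int) + 1) + gsum cnt xs (PySem.Set.add S x)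

-- B's sweep: the final total, in terms of gsum
theorem sweep_total (cnt : PySem.Dict Char Int) (cs : List Char) :
    ∀ (t a : Int) (S : PySem.Set Char),
    (cs.foldl
      (fun st ch =>
        if PySem.Set.contains st.2.2 ch then (st.1 + st.2.1, st.2.1, st.2.2)
        else (st.1 + (st.2.1 + cnt.getD ch 0), st.2.1 + cnt.getD ch 0, PySem.Set.add st.2.2 ch))
      (t, a, S)).1
      = t + a * (cs.length : Int) + gsum (fun c => cnt.getD c 0) cs S := by
  induction cs with
  | nil => intro t a S; simp [gsum]
  | cons x xs ih =>
    intro t a S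
    by_cases hx : PySem.Set.contains S x
    · rw [List.foldl_cons, if_pos hx, ih, gsum, if_pos hx]
      simp only [List.length_cons]
      push_cast
      ring
    · rw [List.foldl_cons, if_neg hx, ih, gsum, if_neg hx]
      simp only [List.length_cons]
      push_cast
      ring

-- gsum as a Finset sum over the not-yet-seen distinct characters of cs
theorem gsum_eq_finset (cnt : Char → Int) (cs : List Char) :
    ∀ (S : PySem.Set Char),
    gsum cnt cs S = ∑ c ∈ cs.toFinset \ S.toFinset,
      cnt c * ((cs.length : Int) - (cs.idxOf c : Int)) := by
  induction cs with
  | nil => intro S; simp [gsum]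
  | cons x xs ih =>
    intro S
    by_cases hx : PySem.Set.contains S x
    · have hxS : x ∈ S.toFinset := by
        rw [List.mem_toFinset]; exact (PySem.Set.contains_iff S x).mp hx
      rw [gsum, if_pos hx, ih]
      rw [List.toFinset_cons, Finset.insert_sdiff_of_mem _ hxS]
      refine Finset.sum_congr rfl (fun c hc => ?_)
      rw [Finset.mem_sdiff] at hc
      have hne : x ≠ c := fun h => hc.2 (h ▸ hxS)
      have : (x :: xs).idxOf c = xs.idxOf c + 1 := by simp [hne]
      rw [this]
      simp only [List.length_cons]
      push_cast
      ring
    · have hxS : x ∉ S.toFinset := by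
        rw [List.mem_toFinset]
        exact fun h => hx ((PySem.Set.contains_iff S x).mpr h)
      have haddS : (PySem.Set.add S x).toFinset = insert x S.toFinset := by
        ext c
        simp [PySem.Set.mem_add, or_comm]
      rw [gsum, if_neg hx, ih, haddS]
      have hsplit : (x :: xs).toFinset \ S.toFinset
          = insert x (xs.toFinset \ insert x S.toFinset) := by
        ext c
        simp only [List.toFinset_cons, Finset.mem_sdiff, Finset.mem_insert, List.mem_toFinset]
        constructor
        · rintro ⟨hc1 | hc2, hcs⟩
          · exact Or.inl hc1
          · by_cases hcx : c = x
            · exact Or.inl hcx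
            · exact Or.inr ⟨hc2, by simp [hcx, hcs]⟩
        · rintro (hc | ⟨hc, hcn⟩)
          · subst hc
            exact ⟨Or.inl rfl, fun h => hxS (by simpa using h)⟩
          · exact ⟨Or.inr hc, fun h => hcn (Or.inr (by simpa using h))⟩
      rw [hsplit, Finset.sum_insert (by simp)]
      have hx0 : (x :: xs).idxOf x = 0 := by simp
      rw [hx0]
      have hrest : ∑ c ∈ xs.toFinset \ insert x S.toFinset,
          cnt c * ((xs.length : Int) - (xs.idxOf c : Int))
          = ∑ c ∈ xs.toFinset \ insert x S.toFinset,
          cnt c * (((x :: xs).length : Int) - (((x :: xs).idxOf c : Nat) : Int)) := by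
        refine Finset.sum_congr rfl (fun c hc => ?_)
        rw [Finset.mem_sdiff, Finset.mem_insert] at hc
        have hne : x ≠ c := fun h => hc.2 (Or.inl h.symm)
        have : (x :: xs).idxOf c = xs.idxOf c + 1 := by simp [hne]
        rw [this]
        simp only [List.length_cons]
        push_cast
        ring
      rw [hrest]
      congr 1
      all_goals simp only [List.length_cons]; push_cast; ring

-- A's per-query sum, regrouped over distinct query characters
theorem mapsum_eq_finset (Q : List Char) (g : Char → Int) :
    (Q.map g).sum = ∑ m ∈ Q.toFinset, (Q.count m : Int) * g m := by
  rw [Finset.sum_list_map_count Q g]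
  exact Finset.sum_congr rfl (fun x _ => by rw [nsmul_eq_mul])

-- count·suffLen and count·(len − idxOf) agree at every character
theorem term_eq (Q cs : List Char) (c : Char) :
    (Q.count c : Int) * suffLen cs c
      = (Q.count c : Int) * ((cs.length : Int) - (cs.idxOf c : Int)) := by
  by_cases hm : c ∈ cs
  · rw [suffLen, if_pos hm]
  · rw [suffLen, if_neg hm, List.idxOf_eq_length_iff.mpr hm]
    push_cast
    ring

-- the two regrouped sums coincide (extend both to the union; the extra terms vanish)
theorem sums_agree (Q cs : List Char) :
    ∑ m ∈ Q.toFinset, (Q.count m : Int) * suffLen cs m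
      = ∑ c ∈ cs.toFinset, (Q.count c : Int) * ((cs.length : Int) - (cs.idxOf c : Int)) := by
  have h1 : ∑ m ∈ Q.toFinset, (Q.count m : Int) * suffLen cs m
      = ∑ m ∈ Q.toFinset ∪ cs.toFinset, (Q.count m : Int) * suffLen cs m := by
    refine Finset.sum_subset Finset.subset_union_left (fun c _ hc => ?_)
    rw [List.mem_toFinset] at hc
    rw [List.count_eq_zero_of_not_mem hc]
    push_cast
    ring
  have h2 : ∑ c ∈ cs.toFinset, (Q.count c : Int) * ((cs.length : Int) - (cs.idxOf c : Int))
      = ∑ c ∈ Q.toFinset ∪ cs.toFinset, (Q.count c : Int) * ((cs.length : Int) - (cs.idxOf c : Int)) := by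
    refine Finset.sum_subset Finset.subset_union_right (fun c _ hc => ?_)
    rw [List.mem_toFinset] at hc
    rw [List.idxOf_eq_length_iff.mpr hc]
    push_cast
    ring
  rw [h1, h2]
  exact Finset.sum_congr rfl (fun c _ => term_eq Q cs c)

-- ===== VERDICT (by name: the statement is the Claim_ definition above) =====
theorem suff_spec : Claim_equal_suff := by
  intro n s query q _
  unfold Spec_suff suff suff_alt
  simp only []
  congr 1
  rw [PySem.List.foldl_congr_mem query.toList _ (fun sum1 i => sum1 + suffLen s.toList i) 0
        (fun a x _ => stepA_eq s.toList a x)]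
  rw [PySem.List.foldl_add]
  rw [sweep_total]
  rw [gsum_eq_finset]
  rw [PySem.Dict.foldl_insert_getD_add_one_eq_counter]
  simp only [PySem.Dict.getD_counter]
  rw [show (PySem.Set.empty : PySem.Set Char).toFinset = ∅ from rfl]
  rw [Finset.sdiff_empty]
  rw [mapsum_eq_finset]
  rw [sums_agree query.toList s.toList]
  ring
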